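-- pv_equiv track=rewrite | github.com/BarnabyShearer/aoc | aoc20201211a.py | aoc
-- ===== SOURCE A (Python) =====
-- def surround(map, data, pos):
--     return len([True for p in map if 0 <= pos + p < len(data) and data[pos + p] == "#"])
--
-- def step(map, data):
--     for pos, seat in enumerate(data):
--         if seat == "#":
--             yield "L" if surround(map, data, pos) >= 4 else "#"
--         elif seat == "L":
--             yield "#" if surround(map, data, pos) == 0 else "L"
--         else:
--             yield seat
--
-- def aoc(data):
--     w = data.index("\n") + 1
--     map = [-w - 1, -w, -w + 1, -1, +1, +w - 1, +w, +w + 1]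
--     prev = ""
--     while data != prev:
--         prev = data
--         data = "".join(step(map, data))
--     return data.count("#")
-- ===== SOURCE B (Python) =====
-- def aoc(data):
--     w = data.index("\n") + 1
--     n = len(data)
--     while True:
--         ind = [1 if c == "#" else 0 for c in data]
--         counts = [0] * n
--         for p in (-w - 1, -w, -w + 1, -1, 1, w - 1, w, w + 1):
--             if p >= 0:
--                 shifted = ([0] * p + ind)[:n]
--             else:
--                 shifted = (ind[-p:] + [0] * -p)[:n]
--             counts = [a + b for a, b in zip(counts, shifted)]
--         nxt = []
--         for c, k in zip(data, counts):
--             if c == "#":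
--                 nxt.append("L" if k >= 4 else "#")
--             elif c == "L":
--                 nxt.append("#" if k == 0 else "L")
--             else:
--                 nxt.append(c)
--         nxt = "".join(nxt)
--         if nxt == data:
--             return data.count("#")
--         data = nxt
-- ===== Notes on version B (the rewrite author's own statement) =====
-- stated objective: alternative
-- what changed: Per-cell neighbour counting (a guarded 8-offset list comprehension re-run for every seat each step) is replaced by a vectorised step: the 0/1 occupancy vector is shifted by each of the 8 offsets and summed elementwise into one counts vector, the rules are then applied by zipping the grid with it, and the outer loop compares the new grid with the current one instead of carrying prev; proved equal via the negation symmetry of the offset list.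
import Mathlib
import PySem

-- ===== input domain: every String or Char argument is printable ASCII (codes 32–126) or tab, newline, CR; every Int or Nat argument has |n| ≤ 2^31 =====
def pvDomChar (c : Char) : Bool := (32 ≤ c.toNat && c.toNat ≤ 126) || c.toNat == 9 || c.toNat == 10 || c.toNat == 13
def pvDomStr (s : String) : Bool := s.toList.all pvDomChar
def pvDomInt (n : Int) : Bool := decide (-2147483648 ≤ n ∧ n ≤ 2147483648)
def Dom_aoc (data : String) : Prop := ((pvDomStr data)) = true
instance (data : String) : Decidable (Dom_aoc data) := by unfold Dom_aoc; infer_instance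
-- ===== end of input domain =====

-- B replaces A's per-seat 8-offset gather scan (a guarded list comprehension run for every cell)
-- by a vectorised step: an occupancy 0/1 vector is shifted by each of the 8 offsets and the shifts
-- are summed elementwise into one counts vector, then the rules are applied by zipping the grid
-- with it; the outer loop compares the new grid against the current one instead of carrying 'prev'.
-- Return-value equivalence only; neither program mutates its argument.

-- ===== PORT A =====
-- surround(map, data, pos): count offsets p with 0 <= pos+p < len(data) and data[pos+p] == '#'
def pvSurround (map : List Int) (d : List Char) (pos : Int) : Int :=
  ((map.filter (fun p =>
      decide (0 ≤ pos + p) && decide (pos + p < (d.length : Int)) &&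
      (PySem.List.pyGet? d (pos + p) == some '#'))).length : Int)

-- step(map, data): one generator pass, transliterated as a map over enumerate(data)
def pvStepA (map : List Int) (d : List Char) : List Char :=
  (PySem.List.enumerate d).map (fun pc =>
    if pc.2 = '#' then (if 4 ≤ pvSurround map d pc.1 then 'L' else '#')
    else if pc.2 = 'L' then (if pvSurround map d pc.1 = 0 then '#' else 'L')
    else pc.2)

-- the 'while data != prev' loop, made total with fuel (2^len + 2 bounds the distinct states
-- reachable before a repeat, so whenever the Python loop terminates the fuel suffices)
def pvLoopA (map : List Int) : Nat → List Char → List Char → List Char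
  | 0, _, d => d
  | fuel + 1, prev, d => if d = prev then d else pvLoopA map fuel d (pvStepA map d)

def aoc (data : String) : Int :=
  let d := data.toList
  let w : Int := PySem.Chars.find d ['\n'] + 1
  let map : List Int := [-w - 1, -w, -w + 1, -1, 1, w - 1, w, w + 1]
  (((pvLoopA map (2 ^ d.length + 2) [] d).count '#' : Nat) : Int)

-- ===== PORT B =====
-- ind = [1 if c == '#' else 0 for c in data]
def pvInd (d : List Char) : List Int := d.map (fun c => if c = '#' then (1 : Int) else 0)

-- ([0]*p + ind)[:n] for p >= 0, (ind[-p:] + [0]*-p)[:n] for p < 0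
-- (exact: a Python slice with nonnegative start is drop, [:n] is take)
def pvShift (p : Int) (n : Nat) (ind : List Int) : List Int :=
  if 0 ≤ p then (List.replicate p.toNat 0 ++ ind).take n
  else (ind.drop (-p).toNat ++ List.replicate (-p).toNat 0).take n

-- counts = elementwise sum of the 8 shifted occupancy vectors
def pvCountsB (w : Int) (d : List Char) : List Int :=
  [-w - 1, -w, -w + 1, -1, 1, w - 1, w, w + 1].foldl
    (fun counts p => List.zipWith (· + ·) counts (pvShift p d.length (pvInd d)))
    (List.replicate d.length 0)

-- the seat rules, applied to one (cell, count) pair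
def pvRule (c : Char) (k : Int) : Char :=
  if c = '#' then (if 4 ≤ k then 'L' else '#')
  else if c = 'L' then (if k = 0 then '#' else 'L')
  else c

def pvStepB (w : Int) (d : List Char) : List Char :=
  List.zipWith pvRule d (pvCountsB w d)

-- 'while True: nxt = step(data); if nxt == data: return; data = nxt', made total with fuel
def pvLoopB (w : Int) : Nat → List Char → List Char
  | 0, d => d
  | fuel + 1, d => if pvStepB w d = d then d else pvLoopB w fuel (pvStepB w d)

def aoc_alt (data : String) : Int :=
  let d := data.toList
  let w : Int := PySem.Chars.find d ['\n'] + 1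
  (((pvLoopB w (2 ^ d.length + 2) d).count '#' : Nat) : Int)

-- ===== PRECONDITION & SPEC =====
-- Pre_ excludes exactly the inputs on which A raises (no '\n' in data: data.index("\n") raises
-- ValueError). On some pathological inputs inside Pre_ (e.g. ragged grids) A's while loop never
-- reaches a fixed point and the Python never returns; both ports run a fuelled loop applying the
-- same step function there, so the proved equality still holds, and B's Python diverges there
-- exactly as A's does.
def Pre_aoc (data : String) : Prop := '\n' ∈ data.toList
instance (data : String) : Decidable (Pre_aoc data) := by unfold Pre_aoc; infer_instance

def pvWitness_aoc : String := "#L\nLL\n"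

def Spec_aoc (data : String) (out : Int) : Prop := out = aoc_alt data
instance (data : String) (out : Int) : Decidable (Spec_aoc data out) := by unfold Spec_aoc; infer_instance

-- ===== CLAIM (what is proved, stated in full; the proofs are below) =====
def Claim_equal_aoc : Prop := ∀ (data : String), Dom_aoc data → Pre_aoc data → Spec_aoc data (aoc data)

-- ===== LEMMAS AND PROOFS =====

-- the 8-offset list is its own reverse under negation (for every w)
theorem pvOffs_map_neg (w : Int) :
    ([-w - 1, -w, -w + 1, -1, 1, w - 1, w, w + 1] : List Int).map (fun x => -x) =
    ([-w - 1, -w, -w + 1, -1, 1, w - 1, w, w + 1] : List Int).reverse := by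
  simp [List.map]; omega

theorem pvPyGet_nonneg (d : List Char) (j : Int) (h : 0 ≤ j) :
    PySem.List.pyGet? d j = d[j.toNat]? := by
  have h0 : j = ((j.toNat : Nat) : Int) := by omega
  conv_lhs => rw [h0]
  rw [PySem.List.pyGet?_natCast]

-- ind.getD is the occupancy indicator
theorem pvInd_getD (d : List Char) (m : Nat) (hm : m < d.length) :
    (pvInd d).getD m 0 = if d[m]? = some '#' then (1 : Int) else 0 := by
  unfold pvInd
  rw [List.getD, List.getElem?_map, List.getElem?_eq_getElem hm]
  simp

theorem pvShift_length (p : Int) (n : Nat) (ind : List Int) (h : ind.length = n) :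
    (pvShift p n ind).length = n := by
  unfold pvShift
  split <;> first | (simp [h]; omega) | simp [h]

-- the shifted vector reads the occupancy at j - p, zero outside
theorem pvShift_getD (p : Int) (n : Nat) (ind : List Int) (h : ind.length = n)
    (j : Nat) (hj : j < n) :
    (pvShift p n ind).getD j 0 =
      if 0 ≤ (j : Int) - p ∧ (j : Int) - p < (n : Int) then ind.getD ((j : Int) - p).toNat 0
      else 0 := by
  unfold pvShift
  by_cases hp : 0 ≤ p
  · rw [if_pos hp, List.getD, List.getElem?_take_of_lt hj]
    by_cases hjp : (p.toNat : Nat) ≤ j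
    · rw [List.getElem?_append_right (by simpa using hjp)]
      rw [if_pos ⟨by omega, by omega⟩, List.getD]
      congr 1
      · congr 1; simp; omega
    · rw [List.getElem?_append_left (by simpa using (by omega : j < p.toNat))]
      rw [if_neg (by omega)]
      rw [List.getElem?_replicate, if_pos (by omega)]
      rfl
  · rw [if_neg hp, List.getD, List.getElem?_take_of_lt hj]
    have hm : (-p).toNat = (-p).toNat := rfl
    by_cases hin : j + (-p).toNat < n
    · rw [List.getElem?_append_left (by simp; omega)]
      rw [if_pos ⟨by omega, by omega⟩, List.getElem?_drop, List.getD]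
      congr 1; congr 1; omega
    · rw [List.getElem?_append_right (by simp; omega)]
      rw [if_neg (by omega), List.getElem?_replicate]
      split <;> rfl

theorem pvZipAdd_getD (a b : List Int) (j : Nat) (hja : j < a.length) (hjb : j < b.length) :
    (List.zipWith (· + ·) a b).getD j 0 = a.getD j 0 + b.getD j 0 := by
  rw [List.getD, List.getD, List.getD,
      List.getElem?_eq_getElem (by simp; omega),
      List.getElem?_eq_getElem hja, List.getElem?_eq_getElem hjb]
  simp

-- the foldl of zipWith-add over a list of shifts, characterised pointwise
theorem pvFoldShift_length (ps : List Int) (n : Nat) (ind cs : List Int)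
    (hind : ind.length = n) (hcs : cs.length = n) :
    (ps.foldl (fun counts p => List.zipWith (· + ·) counts (pvShift p n ind)) cs).length = n := by
  induction ps generalizing cs with
  | nil => exact hcs
  | cons p ps ih =>
      rw [List.foldl_cons]
      exact ih _ (by rw [List.length_zipWith, hcs, pvShift_length p n ind hind]; omega)

theorem pvFoldShift_getD (ps : List Int) (n : Nat) (ind cs : List Int)
    (hind : ind.length = n) (hcs : cs.length = n) (k : Nat) (hk : k < n) :
    (ps.foldl (fun counts p => List.zipWith (· + ·) counts (pvShift p n ind)) cs).getD k 0 =
      cs.getD k 0 +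
      (ps.map (fun p =>
        if 0 ≤ (k : Int) - p ∧ (k : Int) - p < (n : Int) then ind.getD ((k : Int) - p).toNat 0
        else 0)).sum := by
  induction ps generalizing cs with
  | nil => simp
  | cons p ps ih =>
      rw [List.foldl_cons, List.map_cons, List.sum_cons,
          ih _ (by rw [List.length_zipWith, hcs, pvShift_length p n ind hind]; omega),
          pvZipAdd_getD cs _ k (by omega) (by rw [pvShift_length p n ind hind]; omega),
          pvShift_getD p n ind hind k hk]
      ring

theorem pvCountsB_length (w : Int) (d : List Char) : (pvCountsB w d).length = d.length := by
  unfold pvCountsB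
  exact pvFoldShift_length _ _ _ _ (by simp [pvInd]) (by simp)

theorem pvCountsB_getD (w : Int) (d : List Char) (k : Nat) (hk : k < d.length) :
    (pvCountsB w d).getD k 0 =
      (([-w - 1, -w, -w + 1, -1, 1, w - 1, w, w + 1] : List Int).map (fun p =>
        if 0 ≤ (k : Int) - p ∧ (k : Int) - p < (d.length : Int) then
          (pvInd d).getD ((k : Int) - p).toNat 0
        else 0)).sum := by
  unfold pvCountsB
  rw [pvFoldShift_getD _ _ _ _ (by simp [pvInd]) (by simp) k hk]
  simp

-- A's surround, as the same kind of sum (gather form)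
theorem pvSurround_eq_sum (ps : List Int) (d : List Char) (pos : Int) :
    pvSurround ps d pos =
      (ps.map (fun p =>
        if 0 ≤ pos + p ∧ pos + p < (d.length : Int) then (pvInd d).getD (pos + p).toNat 0
        else 0)).sum := by
  induction ps with
  | nil => simp [pvSurround]
  | cons p ps ih =>
      have key : (decide (0 ≤ pos + p) && decide (pos + p < (d.length : Int)) &&
            (PySem.List.pyGet? d (pos + p) == some '#'))
          = decide (0 ≤ pos + p ∧ pos + p < (d.length : Int) ∧ d[(pos + p).toNat]? = some '#') := by
        by_cases h1 : 0 ≤ pos + p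
        · rw [pvPyGet_nonneg d _ h1]
          by_cases h2 : pos + p < (d.length : Int) <;>
            by_cases h3 : d[(pos + p).toNat]? = some '#' <;>
              simp [h1, h2, beq_eq_decide]
        · simp [h1]
      have hstep : pvSurround (p :: ps) d pos =
          (if 0 ≤ pos + p ∧ pos + p < (d.length : Int) ∧ d[(pos + p).toNat]? = some '#'
           then (1 : Int) else 0) + pvSurround ps d pos := by
        simp only [pvSurround, List.filter_cons, key]
        by_cases hb : 0 ≤ pos + p ∧ pos + p < (d.length : Int) ∧ d[(pos + p).toNat]? = some '#'
        · have hv : d[(pos + p).toNat] = '#' := by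
            have h3 := hb.2.2
            rw [List.getElem?_eq_getElem (by omega)] at h3
            exact Option.some_inj.mp h3
          simp only [hb]
          simp
          omega
        · simp [hb]
      rw [hstep, ih, List.map_cons, List.sum_cons]
      congr 1
      by_cases hb : 0 ≤ pos + p ∧ pos + p < (d.length : Int)
      · rw [if_pos hb, pvInd_getD d _ (by omega)]
        by_cases h3 : d[(pos + p).toNat]? = some '#'
        · rw [if_pos ⟨hb.1, hb.2, h3⟩, if_pos h3]
        · rw [if_neg (by rintro ⟨_, _, h⟩; exact h3 h), if_neg h3]
      · rw [if_neg (by rintro ⟨a, b, _⟩; exact hb ⟨a, b⟩), if_neg hb]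

-- gather = scatter: by the negation symmetry of the offset list
theorem pvSurround_eq_counts (w : Int) (d : List Char) (k : Nat) (hk : k < d.length) :
    pvSurround [-w - 1, -w, -w + 1, -1, 1, w - 1, w, w + 1] d (k : Int) =
      (pvCountsB w d).getD k 0 := by
  rw [pvSurround_eq_sum, pvCountsB_getD w d k hk]
  have h : (([-w - 1, -w, -w + 1, -1, 1, w - 1, w, w + 1] : List Int).map (fun p =>
        if 0 ≤ (k : Int) - p ∧ (k : Int) - p < (d.length : Int) then
          (pvInd d).getD ((k : Int) - p).toNat 0
        else 0)) =
      (([-w - 1, -w, -w + 1, -1, 1, w - 1, w, w + 1] : List Int).map (fun x => -x)).map (fun p =>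
        if 0 ≤ (k : Int) + p ∧ (k : Int) + p < (d.length : Int) then
          (pvInd d).getD ((k : Int) + p).toNat 0
        else 0) := by
    rw [List.map_map]
    apply List.map_congr_left
    intro p _
    simp only [Function.comp]
    rw [show (k : Int) + -p = (k : Int) - p by ring]
  rw [h, pvOffs_map_neg, List.map_reverse, List.sum_reverse]

theorem pvStep_eq (w : Int) (d : List Char) :
    pvStepA [-w - 1, -w, -w + 1, -1, 1, w - 1, w, w + 1] d = pvStepB w d := by
  apply List.ext_getElem
  · simp [pvStepA, pvStepB, PySem.List.length_enumerate, pvCountsB_length]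
  · intro i h1 h2
    have hi : i < d.length := by
      simpa [pvStepA, PySem.List.length_enumerate] using h1
    have hlen : i < (pvCountsB w d).length := by rw [pvCountsB_length]; exact hi
    have hsc : pvSurround [-w - 1, -w, -w + 1, -1, 1, w - 1, w, w + 1] d (i : Int) =
        (pvCountsB w d)[i]'hlen := by
      rw [pvSurround_eq_counts w d i hi, List.getD, List.getElem?_eq_getElem hlen]
      rfl
    simp only [pvStepA, pvStepB, List.getElem_map, PySem.List.getElem_enumerate,
      List.getElem_zipWith, pvRule, zero_add, hsc]

theorem pvLoopA_self (map : List Int) (F : Nat) (d : List Char) :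
    pvLoopA map F d d = d := by
  cases F <;> simp [pvLoopA]

-- same fuel, different loop shapes: they agree whenever prev ≠ d
theorem pvLoop_eq (w : Int) (F : Nat) (prev d : List Char) (h : prev ≠ d) :
    pvLoopA [-w - 1, -w, -w + 1, -1, 1, w - 1, w, w + 1] F prev d = pvLoopB w F d := by
  induction F generalizing prev d with
  | zero => rfl
  | succ n ih =>
      rw [pvLoopA, pvLoopB, if_neg (fun hdp => h hdp.symm), pvStep_eq]
      by_cases hs : pvStepB w d = d
      · rw [if_pos hs, hs, pvLoopA_self]
      · rw [if_neg hs]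
        exact ih d (pvStepB w d) (fun hd => hs hd.symm)

-- ===== VERDICT (by name: the statement is the Claim_ definition above) =====
theorem aoc_spec : Claim_equal_aoc := by
  intro data _ hpre
  unfold Spec_aoc aoc aoc_alt
  have hne : ([] : List Char) ≠ data.toList := by
    intro h
    unfold Pre_aoc at hpre
    rw [← h] at hpre
    exact (List.not_mem_nil) hpre
  simp only [pvLoop_eq _ _ _ _ hne]
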